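-- pv_equiv track=rewrite | github.com/raouf-kri/Pyhton | replace.py | rempalce
-- ===== SOURCE A (Python) =====
-- def rempalce(string,occurrence):            # fonction remplace avec deux paramatres(chaine et l'occurence) qui substitue l’occurrence du mot « USTHB » par le caractère #
--     chainex =  ""                           # chainex = chaine sans virgules et sans apostrophes
--
--     for char in string:                     # parcour de la chaine caractere par caractere
--         if char in "',":                    # si on trouve une virgule ou bien une apostrophe on la remplace par un espace
--             char = "  "
--         chainex += char                     # chaine sans "'" et ","
--
--     mots = chainex.split()                  # split() pour séparer la chaine a partir des espaces
--     i = 0                                   # initialisation de i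
--     nouv_chaine = ""                        # initialisation de la nouvelle chaine
--
--     for m in mots:                          # parcourir la chaine mot par moot
--         if "USTHB" in m:                    # recherche de "USTHB"
--             i+=1                            # incrementation de i
--             if i == occurrence:             # l'occurence qu'on veut remplacer
--                 m = "#"                     # remplacemenet
--         nouv_chaine += m + " "              # insertion des mots a la nouvelle chaine et les separer par un espace
--     return nouv_chaine[:-1]                 # retourne de la nouvelle chaine obtenue avec la suppression du dernier espace
-- ===== SOURCE B (Python) =====
-- def _hit(word, count, occurrence):
--     # classify one completed word: bump the USTHB counter, swap in '#' on the hit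
--     if "USTHB" in word:
--         count += 1
--         if count == occurrence:
--             word = "#"
--     return word, count
--
-- def rempalce(string, occurrence):
--     # Single-pass character-level state machine: no cleaning pass, no split(),
--     # no trailing-space slice.  Separators (whitespace, comma, apostrophe)
--     # terminate the current word, which is emitted immediately with a single
--     # space before it when the output is non-empty.
--     res = ""
--     word = ""
--     count = 0
--     for c in string:
--         if c.isspace() or c == "'" or c == ",":
--             if word:
--                 word, count = _hit(word, count, occurrence)
--                 res = word if not res else res + " " + word
--                 word = ""
--         else:
--             word += c
--     if word:
--         word, count = _hit(word, count, occurrence)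
--         res = word if not res else res + " " + word
--     return res
-- ===== Notes on version B (the rewrite author's own statement) =====
-- stated objective: alternative
-- what changed: A's staged pipeline (build a cleaned copy of the string, split() it into a word list, loop over the words appending each plus a space to an accumulator, slice off the trailing space) is replaced by a single character-level state machine: one pass over the raw characters that buffers the current word, treats whitespace/comma/apostrophe as terminators, and emits each completed (possibly '#'-swapped) word immediately with a separating space only when output already exists -- no cleaned copy, no split, no word list, no trailing-space slice.
import Mathlib
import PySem

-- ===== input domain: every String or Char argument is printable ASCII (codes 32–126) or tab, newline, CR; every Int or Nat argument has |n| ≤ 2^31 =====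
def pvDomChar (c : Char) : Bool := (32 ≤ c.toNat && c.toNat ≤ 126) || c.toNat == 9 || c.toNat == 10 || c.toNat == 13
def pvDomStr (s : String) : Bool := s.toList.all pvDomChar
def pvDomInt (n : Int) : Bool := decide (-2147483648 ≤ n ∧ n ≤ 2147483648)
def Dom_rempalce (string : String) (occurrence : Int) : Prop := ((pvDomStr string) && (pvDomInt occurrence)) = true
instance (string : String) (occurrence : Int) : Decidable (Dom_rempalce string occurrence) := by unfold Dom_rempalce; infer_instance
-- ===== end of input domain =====

-- B replaces A's staged pipeline (cleaned copy, split, word loop with accumulator,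
-- trailing-space slice) by a single character-level state machine that emits each
-- completed word as it is scanned (objective: alternative decomposition, same cost).


-- ===== PORT A =====
-- 'char in "',"' is membership of the single char in the two-char string: ported
-- exactly as the disjunction c = '\'' ∨ c = ','.
def rempalce (string : String) (occurrence : Int) : String :=
  let chainex : List Char :=
    string.toList.foldl
      (fun acc c => acc ++ (if c = '\'' ∨ c = ',' then [' ', ' '] else [c])) []
  let mots := PySem.Chars.split₀ chainex
  let res :=
    mots.foldl
      (fun (st : Int × List Char) m =>
        if PySem.Chars.isIn ['U','S','T','H','B'] m then
          let i := st.1 + 1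
          let m := if i = occurrence then ['#'] else m
          (i, st.2 ++ m ++ [' '])
        else (st.1, st.2 ++ m ++ [' ']))
      (0, [])
  String.ofList (PySem.Chars.slice res.2 none (some (-1)))

-- ===== PORT B =====
-- Source B's helper _hit: classify one completed word
def rempalceHit (occurrence : Int) (word : List Char) (count : Int) : List Char × Int :=
  if PySem.Chars.isIn ['U','S','T','H','B'] word then
    let count := count + 1
    ((if count = occurrence then ['#'] else word), count)
  else (word, count)

-- Source B's main loop: state machine over the raw characters with state (res, word, count)
def rempalceGo (occurrence : Int) : List Char → List Char → List Char → Int → List Char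
  | [], res, word, count =>
      if word.isEmpty then res
      else
        let p := rempalceHit occurrence word count
        if res.isEmpty then p.1 else res ++ [' '] ++ p.1
  | c :: cs, res, word, count =>
      if PySem.Chars.isspace c ∨ c = '\'' ∨ c = ',' then
        if word.isEmpty then rempalceGo occurrence cs res [] count
        else
          let p := rempalceHit occurrence word count
          rempalceGo occurrence cs (if res.isEmpty then p.1 else res ++ [' '] ++ p.1) [] p.2
      else rempalceGo occurrence cs res (word ++ [c]) count

def rempalce_alt (string : String) (occurrence : Int) : String :=
  String.ofList (rempalceGo occurrence string.toList [] [] 0)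

-- ===== PRECONDITION & SPEC =====
def Spec_rempalce (string : String) (occurrence : Int) (out : String) : Prop := out = rempalce_alt string occurrence
instance (string : String) (occurrence : Int) (out : String) : Decidable (Spec_rempalce string occurrence out) := by unfold Spec_rempalce; infer_instance

-- ===== CLAIM (what is proved, stated in full; the proofs are below) =====
def Claim_equal_rempalce : Prop := ∀ (string : String) (occurrence : Int), Dom_rempalce string occurrence → Spec_rempalce string occurrence (rempalce string occurrence)

-- ===== LEMMAS AND PROOFS =====

-- A's cleaning (a char becomes two spaces) and the single-space cleaning map
-- split into the same word list.
theorem split_go_clean_eq (s : List Char) : ∀ (cur : List Char) (acc : List (List Char)),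
    PySem.Chars.split₀.go
      (s.flatMap (fun c => if c = '\'' ∨ c = ',' then [' ', ' '] else [c])) cur acc
    = PySem.Chars.split₀.go
      (s.map (fun c => if c = '\'' ∨ c = ',' then ' ' else c)) cur acc := by
  have hs : PySem.Chars.isspace ' ' = true := by decide
  induction s with
  | nil => intro cur acc; rfl
  | cons c s ih =>
    intro cur acc
    by_cases hc : c = '\'' ∨ c = ','
    · simp only [List.flatMap_cons, List.map_cons, if_pos hc, List.cons_append,
        List.nil_append]
      simp only [PySem.Chars.split₀.go, hs, if_true, List.isEmpty_nil]
      by_cases hcur : cur.isEmpty <;> simp [hcur, ih]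
    · simp only [List.flatMap_cons, List.map_cons, if_neg hc, List.singleton_append]
      simp only [PySem.Chars.split₀.go]
      by_cases hsp : PySem.Chars.isspace c
      · by_cases hcur : cur.isEmpty <;> simp [hsp, hcur, ih]
      · simp [hsp, ih]

-- the word-by-word result of A's loop, as a list of words
def procA (occurrence : Int) : List (List Char) → Int → List (List Char)
  | [], _ => []
  | w :: ws, i =>
      if PySem.Chars.isIn ['U','S','T','H','B'] w then
        (if i + 1 = occurrence then ['#'] else w) :: procA occurrence ws (i + 1)
      else w :: procA occurrence ws i

theorem loopA_eq (occurrence : Int) (ws : List (List Char)) :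
    ∀ (i : Int) (acc : List Char),
    (ws.foldl
      (fun (st : Int × List Char) m =>
        if PySem.Chars.isIn ['U','S','T','H','B'] m then
          let i := st.1 + 1
          let m := if i = occurrence then ['#'] else m
          (i, st.2 ++ m ++ [' '])
        else (st.1, st.2 ++ m ++ [' ']))
      (i, acc)).2
    = acc ++ (procA occurrence ws i).flatMap (· ++ [' ']) := by
  induction ws with
  | nil => intro i acc; simp [procA]
  | cons w ws ih =>
    intro i acc
    by_cases hw : PySem.Chars.isIn ['U','S','T','H','B'] w = true
    · simp only [List.foldl_cons, procA, hw, if_true, List.flatMap_cons]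
      rw [ih]
      simp [List.append_assoc]
    · simp only [List.foldl_cons, procA, hw, Bool.false_eq_true, if_false, List.flatMap_cons]
      rw [ih]
      simp [List.append_assoc]

-- the word list split₀ produces, phrased with a forward-order current word
def wlist : List Char → List Char → List (List Char)
  | [], cur => if cur.isEmpty then [] else [cur]
  | c :: cs, cur =>
      if PySem.Chars.isspace c then
        if cur.isEmpty then wlist cs [] else cur :: wlist cs []
      else wlist cs (cur ++ [c])

theorem go_eq_wlist (cs : List Char) : ∀ (cur : List Char) (acc : List (List Char)),
    PySem.Chars.split₀.go cs cur acc = acc.reverse ++ wlist cs cur.reverse := by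
  induction cs with
  | nil =>
    intro cur acc
    simp only [PySem.Chars.split₀.go, wlist]
    by_cases hcur : cur.isEmpty
    · simp [hcur, List.isEmpty_iff.mp hcur]
    · have : cur.reverse.isEmpty = false := by
        simp [List.isEmpty_iff]; simpa [List.isEmpty_iff] using hcur
      simp [hcur, this]
  | cons c cs ih =>
    intro cur acc
    simp only [PySem.Chars.split₀.go, wlist]
    by_cases hsp : PySem.Chars.isspace c
    · by_cases hcur : cur.isEmpty
      · have : cur.reverse.isEmpty = true := by
          simp [List.isEmpty_iff]; simpa [List.isEmpty_iff] using hcur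
        simp [hsp, hcur, this, ih]
      · have : cur.reverse.isEmpty = false := by
          simp [List.isEmpty_iff]; simpa [List.isEmpty_iff] using hcur
        simp [hsp, hcur, this, ih]
    · simp [hsp, ih]

theorem wlist_ne_nil (cs : List Char) : ∀ (cur : List Char),
    ∀ w ∈ wlist cs cur, w ≠ [] := by
  induction cs with
  | nil =>
    intro cur w hw
    simp only [wlist] at hw
    by_cases hcur : cur.isEmpty
    · simp [hcur] at hw
    · simp [hcur] at hw
      subst hw
      simpa [List.isEmpty_iff] using hcur
  | cons c cs ih =>
    intro cur w hw
    simp only [wlist] at hw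
    by_cases hsp : PySem.Chars.isspace c
    · by_cases hcur : cur.isEmpty
      · exact ih [] w (by simpa [hsp, hcur] using hw)
      · simp [hsp, hcur] at hw
        rcases hw with hw | hw
        · subst hw; simpa [List.isEmpty_iff] using hcur
        · exact ih [] w hw
    · exact ih (cur ++ [c]) w (by simpa [hsp] using hw)

-- the word-level residue of B's machine: emit each word of ws in turn
def emitAll (occurrence : Int) : List Char → Int → List (List Char) → List Char
  | res, _, [] => res
  | res, count, w :: ws =>
      let p := rempalceHit occurrence w count
      emitAll occurrence (if res.isEmpty then p.1 else res ++ [' '] ++ p.1) p.2 ws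

-- B's char machine = clean with the single-space map, take the word list, emit word by word
theorem B_go_eq (occurrence : Int) (cs : List Char) : ∀ (res word : List Char) (count : Int),
    rempalceGo occurrence cs res word count
    = emitAll occurrence res count
        (wlist (cs.map (fun c => if c = '\'' ∨ c = ',' then ' ' else c)) word) := by
  induction cs with
  | nil =>
    intro res word count
    simp only [rempalceGo, List.map_nil, wlist]
    by_cases hw : word.isEmpty
    · simp [hw, emitAll]
    · simp [hw, emitAll]
  | cons c cs ih =>
    intro res word count
    simp only [rempalceGo, List.map_cons, wlist]
    by_cases hc : c = '\'' ∨ c = ','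
    · have h1 : (PySem.Chars.isspace c ∨ c = '\'' ∨ c = ',') := Or.inr hc
      have h2 : PySem.Chars.isspace (if c = '\'' ∨ c = ',' then ' ' else c) = true := by
        simp [hc]; decide
      by_cases hw : word.isEmpty
      · simp [h1, h2, hw, ih, emitAll]
      · simp [h1, h2, hw, ih, emitAll]
    · have h2 : PySem.Chars.isspace (if c = '\'' ∨ c = ',' then ' ' else c)
          = PySem.Chars.isspace c := by simp [hc]
      by_cases hsp : PySem.Chars.isspace c
      · by_cases hw : word.isEmpty
        · simp [hsp, hc, h2, hw, ih, emitAll]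
        · simp [hsp, hc, h2, hw, ih, emitAll]
      · simp [hsp, hc, h2, ih]

-- procA, one word at a time, is exactly rempalceHit
theorem procA_cons_hit (occurrence : Int) (w : List Char) (ws : List (List Char)) (i : Int) :
    procA occurrence (w :: ws) i
    = (rempalceHit occurrence w i).1 :: procA occurrence ws (rempalceHit occurrence w i).2 := by
  by_cases hw : PySem.Chars.isIn ['U','S','T','H','B'] w = true
  · simp [procA, rempalceHit, hw]
  · simp [procA, rempalceHit, hw]

theorem hit_ne_nil (occurrence : Int) (w : List Char) (i : Int) (hw : w ≠ []) :
    (rempalceHit occurrence w i).1 ≠ [] := by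
  unfold rempalceHit
  by_cases h : PySem.Chars.isIn ['U','S','T','H','B'] w
  · by_cases h2 : i + 1 = occurrence <;> simp [h, h2, hw]
  · simp [h, hw]

theorem join_cons_pref (w : List Char) (l : List (List Char)) :
    PySem.Chars.join [' '] (w :: l) = w ++ l.flatMap (fun v => ' ' :: v) := by
  induction l generalizing w with
  | nil => simp [PySem.Chars.join, List.intercalate]
  | cons v t ih =>
    rw [PySem.Chars.join_cons_cons, ih v]
    simp [List.flatMap_cons]

theorem emitAll_nonempty (occurrence : Int) (ws : List (List Char)) :
    ∀ (res : List Char) (count : Int), (∀ w ∈ ws, w ≠ []) → res ≠ [] →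
    emitAll occurrence res count ws
    = res ++ (procA occurrence ws count).flatMap (fun v => ' ' :: v) := by
  induction ws with
  | nil => intro res count _ _; simp [emitAll, procA]
  | cons w ws ih =>
    intro res count hws hres
    have hres' : res.isEmpty = false := by simpa [List.isEmpty_iff] using hres
    simp only [emitAll, hres', Bool.false_eq_true, if_false]
    rw [ih _ _ (fun v hv => hws v (List.mem_cons_of_mem _ hv))
        (by simp)]
    rw [procA_cons_hit]
    simp [List.flatMap_cons, List.append_assoc]

theorem emitAll_nil_res (occurrence : Int) (ws : List (List Char)) (count : Int)
    (hws : ∀ w ∈ ws, w ≠ []) :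
    emitAll occurrence [] count ws = PySem.Chars.join [' '] (procA occurrence ws count) := by
  cases ws with
  | nil => simp [emitAll, procA, PySem.Chars.join, List.intercalate]
  | cons w ws =>
    have hw : w ≠ [] := hws w (List.mem_cons_self ..)
    simp only [emitAll, List.isEmpty_nil, if_true]
    rw [emitAll_nonempty occurrence ws _ _ (fun v hv => hws v (List.mem_cons_of_mem _ hv))
        (hit_ne_nil occurrence w count hw)]
    rw [procA_cons_hit, join_cons_pref]

theorem dropLast_flatMap_space (l : List (List Char)) :
    (l.flatMap (· ++ [' '])).dropLast = PySem.Chars.join [' '] l := by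
  induction l with
  | nil => rfl
  | cons w l ih =>
    cases l with
    | nil => simp [PySem.Chars.join, List.intercalate]
    | cons v t =>
      rw [List.flatMap_cons, PySem.Chars.join_cons_cons, ← ih]
      rw [List.dropLast_append_of_ne_nil (by simp [List.flatMap_cons])]

theorem slice_neg_one (xs : List Char) :
    PySem.Chars.slice xs none (some (-1)) = xs.dropLast := by
  cases xs with
  | nil => rfl
  | cons x t =>
    simp [PySem.Chars.slice, PySem.List.slice, PySem.List.clampIdx, List.dropLast_eq_take]
    split_ifs <;> omega

-- ===== VERDICT (by name: the statement is the Claim_ definition above) =====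
theorem rempalce_spec : Claim_equal_rempalce := by
  intro string occurrence _
  show _ = _
  unfold rempalce rempalce_alt
  simp only []
  rw [PySem.List.foldl_append_eq_flatMap, List.nil_append]
  simp only [PySem.Chars.split₀]
  rw [split_go_clean_eq]
  rw [loopA_eq, List.nil_append, slice_neg_one, dropLast_flatMap_space]
  rw [B_go_eq]
  rw [go_eq_wlist, List.reverse_nil, List.reverse_nil, List.nil_append]
  rw [emitAll_nil_res _ _ _ (wlist_ne_nil _ _)]
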